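-- pv_equiv track=rewrite | github.com/virenderox/DSA_PROBLEM_SHEET_450 | Array/Prob - 6/Union of two arrays/main.py | doUnion
-- ===== SOURCE A (Python) =====
-- def doUnion(a,n,b,m):
--
--     ln_set_a = 0
--     dic_a = {}
--
--     for val in a:
--         if not dic_a.get(val):
--             ln_set_a += 1
--             dic_a[val] = True
--
--
--     count = 0
--     b_set = set(b)
--     for val in b_set:
--         if not dic_a.get(val):
--             count += 1
--
--     return ln_set_a + count
-- ===== SOURCE B (Python) =====
-- def doUnion(a, n, b, m):
--     # Sort the concatenation and count boundaries between runs of equal values: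
--     # in a sorted list, equal elements are adjacent, so the number of positions
--     # where the value differs from its predecessor is the number of distinct
--     # values, i.e. |set(a) | set(b)|.  n and m are ignored, as in A.
--     merged = sorted(a + b)
--     total = 0
--     prev = None
--     for x in merged:
--         if prev is None or x != prev:
--             total += 1
--         prev = x
--     return total
-- ===== Notes on version B (the rewrite author's own statement) =====
-- stated objective: alternative
-- what changed: Replaces A's hash-based counting (dict of seen a-values plus a scan of set(b) for values absent from a) with sort-then-scan: sort a+b and count run boundaries between adjacent unequal elements.
import Mathlib
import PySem

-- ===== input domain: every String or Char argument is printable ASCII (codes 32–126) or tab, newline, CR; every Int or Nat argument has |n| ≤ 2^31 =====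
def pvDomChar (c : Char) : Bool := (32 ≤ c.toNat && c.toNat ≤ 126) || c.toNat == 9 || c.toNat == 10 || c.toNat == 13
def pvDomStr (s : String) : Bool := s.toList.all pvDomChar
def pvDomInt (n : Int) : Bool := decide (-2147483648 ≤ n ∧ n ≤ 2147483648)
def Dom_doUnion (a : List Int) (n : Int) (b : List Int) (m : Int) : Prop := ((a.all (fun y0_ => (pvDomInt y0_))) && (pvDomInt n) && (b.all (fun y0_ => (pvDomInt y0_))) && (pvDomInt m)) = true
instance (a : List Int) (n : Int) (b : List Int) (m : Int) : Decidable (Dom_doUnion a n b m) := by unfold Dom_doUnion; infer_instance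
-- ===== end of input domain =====

-- B sorts a+b and counts run boundaries (adjacent unequal elements) instead of A's
-- dict-of-seen-values counting; n and m are ignored by both.

-- ===== PORT A =====
-- A's first loop: state (ln_set_a, dic_a); dic_a only ever stores True, so Python's
-- 'not dic_a.get(val)' is exactly '!(dic_a.getD val false)'
def doUnionStep (st : Int × PySem.Dict Int Bool) (val : Int) : Int × PySem.Dict Int Bool :=
  if !(st.2.getD val false) then (st.1 + 1, st.2.insert val true) else st

def doUnion (a : List Int) (n : Int) (b : List Int) (m : Int) : Int :=
  let st := a.foldl doUnionStep (0, PySem.Dict.empty)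
  -- second loop runs over b_set = set(b); its result (a count) does not depend on
  -- Python's set iteration order
  let count := (PySem.Set.ofList b).foldl
    (fun c val => if !(st.2.getD val false) then c + 1 else c) (0 : Int)
  st.1 + count

-- ===== PORT B =====
-- the loop body: 'if prev is None or x != prev: total += 1' then 'prev = x'
def doUnionAltStep (st : Int × Option Int) (x : Int) : Int × Option Int :=
  if (match st.2 with | none => true | some p => decide (x ≠ p)) then (st.1 + 1, some x)
  else (st.1, some x)

def doUnion_alt (a : List Int) (n : Int) (b : List Int) (m : Int) : Int :=
  let merged := PySem.List.sorted (a ++ b) (fun x => x) false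
  (merged.foldl doUnionAltStep ((0 : Int), (none : Option Int))).1

-- ===== PRECONDITION & SPEC =====
def Spec_doUnion (a : List Int) (n : Int) (b : List Int) (m : Int) (out : Int) : Prop := out = doUnion_alt a n b m
instance (a : List Int) (n : Int) (b : List Int) (m : Int) (out : Int) : Decidable (Spec_doUnion a n b m out) := by unfold Spec_doUnion; infer_instance

-- ===== CLAIM (what is proved, stated in full; the proofs are below) =====
def Claim_equal_doUnion : Prop := ∀ (a : List Int) (n : Int) (b : List Int) (m : Int), Dom_doUnion a n b m → Spec_doUnion a n b m (doUnion a n b m)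

-- ===== LEMMAS AND PROOFS =====

-- filtering a discard is filtering with the extra '≠ x' conjunct
theorem doUnion_filter_discard (s : List Int) (x : Int) (p : Int → Bool) :
    List.filter p (PySem.Set.discard s x) = List.filter (fun v => p v && !(v == x)) s := by
  show List.filter p (List.filter (fun y => !(y == x)) s) = _
  rw [List.filter_filter]

-- Invariant of A's first loop: as long as every stored value is true (getD ≡ contains),
-- the final table answers membership in 'd or xs', and the counter advances by the
-- number of distinct elements of xs that are fresh for d.
theorem doUnion_loopA (xs : List Int) (c : Int) (d : PySem.Dict Int Bool)
    (hv : ∀ v, d.getD v false = d.contains v) :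
    (∀ v, (xs.foldl doUnionStep (c, d)).2.getD v false = (d.contains v || decide (v ∈ xs))) ∧
    (xs.foldl doUnionStep (c, d)).1
      = c + ((PySem.Set.ofList xs).filter (fun v => !(d.contains v))).length := by
  induction xs generalizing c d with
  | nil => simpa using hv
  | cons x t ih =>
    simp only [List.foldl_cons, doUnionStep, hv x]
    by_cases hx : d.contains x = true
    · rw [if_neg (by simp [hx])]
      obtain ⟨ih1, ih2⟩ := ih c d hv
      refine ⟨fun v => ?_, ?_⟩
      · rw [ih1 v]
        by_cases hvx : v = x
        · subst hvx; simp [hx]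
        · simp [hvx]
      · rw [ih2, PySem.Set.ofList_cons, List.filter_cons, if_neg (by simp [hx]),
          doUnion_filter_discard]
        congr 2
        congr 1
        apply List.filter_congr
        intro v _
        by_cases hvx : v = x
        · subst hvx; simp [hx]
        · have hbe : (v == x) = false := beq_eq_false_iff_ne.mpr hvx
          simp [hbe]
    · rw [if_pos (by simp [hx])]
      have hv' : ∀ v, (d.insert x true).getD v false = (d.insert x true).contains v := by
        intro v
        rw [PySem.Dict.getD_insert, PySem.Dict.contains_insert]
        by_cases hvx : v = x
        · simp [hvx]
        · have hbe : (v == x) = false := beq_eq_false_iff_ne.mpr hvx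
          simp [hvx, hbe, hv v]
      obtain ⟨ih1, ih2⟩ := ih (c + 1) (d.insert x true) hv'
      refine ⟨fun v => ?_, ?_⟩
      · rw [ih1 v, PySem.Dict.contains_insert]
        by_cases hvx : v = x
        · subst hvx; simp
        · have hbe : (v == x) = false := beq_eq_false_iff_ne.mpr hvx
          simp [hbe, hvx]
      · rw [ih2, PySem.Set.ofList_cons, List.filter_cons,
          if_pos (by simp [hx]), List.length_cons, doUnion_filter_discard]
        have : List.filter (fun v => !(d.insert x true).contains v) (PySem.Set.ofList t)
            = List.filter (fun v => !d.contains v && !(v == x)) (PySem.Set.ofList t) := by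
          apply List.filter_congr
          intro v _
          rw [PySem.Dict.contains_insert]
          by_cases hvx : v = x
          · have hbe : (v == x) = true := beq_iff_eq.mpr hvx
            simp [hbe]
          · have hbe : (v == x) = false := beq_eq_false_iff_ne.mpr hvx
            simp [hbe]
        rw [this]
        omega

-- B's scan after the first element: with prev = p and a (p :: t) that is sorted,
-- the counter advances by the number of distinct elements of t other than p.
theorem doUnion_loopB (t : List Int) (p : Int) (c : Int)
    (hs : (p :: t).Pairwise (· ≤ ·)) :
    (t.foldl doUnionAltStep (c, some p)).1
      = c + ((PySem.Set.ofList t).filter (fun v => !(v == p))).length := by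
  induction t generalizing p c with
  | nil => simp
  | cons x t ih =>
    have hpx : p ≤ x := (List.pairwise_cons.1 hs).1 x (by simp)
    have hs' : (x :: t).Pairwise (· ≤ ·) := (List.pairwise_cons.1 hs).2
    simp only [List.foldl_cons, doUnionAltStep]
    by_cases hxp : x = p
    · subst hxp
      rw [if_neg (by simp)]
      rw [ih x c hs', PySem.Set.ofList_cons, List.filter_cons, if_neg (by simp),
        doUnion_filter_discard]
      have hf : List.filter (fun v => !(v == x) && !(v == x)) (PySem.Set.ofList t)
          = List.filter (fun v => !(v == x)) (PySem.Set.ofList t) := by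
        apply List.filter_congr
        intro v _
        simp
      rw [hf]
    · rw [if_pos (by simp [hxp])]
      rw [ih x (c + 1) hs', PySem.Set.ofList_cons, List.filter_cons,
        if_pos (by simpa using hxp), List.length_cons, doUnion_filter_discard]
      have hlt : p < x := lt_of_le_of_ne hpx (Ne.symm hxp)
      have : List.filter (fun v => !(v == p) && !(v == x)) (PySem.Set.ofList t)
          = List.filter (fun v => !(v == x)) (PySem.Set.ofList t) := by
        apply List.filter_congr
        intro v hvmem
        have hv : v ∈ t := (PySem.Set.mem_ofList t v).1 hvmem
        have hxv : x ≤ v := (List.pairwise_cons.1 hs').1 v hv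
        have : v ≠ p := by intro h; subst h; omega
        have hbe : (v == p) = false := beq_eq_false_iff_ne.mpr this
        simp [hbe]
      rw [this]
      omega

-- B's full scan over a sorted list counts the distinct elements
theorem doUnion_scan_distinct (l : List Int) (hs : l.Pairwise (· ≤ ·)) :
    (l.foldl doUnionAltStep ((0 : Int), (none : Option Int))).1
      = ((PySem.Set.ofList l).length : Int) := by
  cases l with
  | nil => simp
  | cons x t =>
    simp only [List.foldl_cons, doUnionAltStep, if_pos]
    rw [doUnion_loopB t x (0 + 1) hs, PySem.Set.ofList_cons]
    have : PySem.Set.discard (PySem.Set.ofList t) x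
        = List.filter (fun v => !(v == x)) (PySem.Set.ofList t) := rfl
    rw [List.length_cons, this]
    push_cast
    omega

-- ofList length only depends on the list up to permutation
theorem doUnion_ofList_length_perm (l l' : List Int) (h : l.Perm l') :
    (PySem.Set.ofList l).length = (PySem.Set.ofList l').length := by
  apply List.Perm.length_eq
  apply (List.perm_ext_iff_of_nodup (PySem.Set.nodup_ofList l) (PySem.Set.nodup_ofList l')).2
  intro v
  rw [PySem.Set.mem_ofList, PySem.Set.mem_ofList]
  exact ⟨fun hv => h.mem_iff.1 hv, fun hv => h.mem_iff.2 hv⟩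

-- ===== VERDICT (by name: the statement is the Claim_ definition above) =====
theorem doUnion_spec : Claim_equal_doUnion := by
  intro a n b m _
  show doUnion a n b m = doUnion_alt a n b m
  obtain ⟨h1, h2⟩ := doUnion_loopA a 0 PySem.Dict.empty (by simp)
  -- A's value: |set(a)| + |{v ∈ set(b) : v ∉ a}|
  show (a.foldl doUnionStep (0, PySem.Dict.empty)).1
      + (PySem.Set.ofList b).foldl
          (fun c val => if !(a.foldl doUnionStep (0, PySem.Dict.empty)).2.getD val false then c + 1 else c) 0
    = _
  rw [PySem.List.foldl_if_add_one, h2]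
  have hcnt : (PySem.Set.ofList b).countP
      (fun val => !(a.foldl doUnionStep (0, PySem.Dict.empty)).2.getD val false)
      = ((PySem.Set.ofList b).filter (fun v => !(PySem.Set.contains (PySem.Set.ofList a) v))).length := by
    rw [List.countP_eq_length_filter]
    congr 1
    apply List.filter_congr
    intro v _
    rw [h1 v]
    simp [PySem.Set.mem_ofList]
  rw [hcnt]
  have hA : ((PySem.Set.ofList a).filter (fun v => !(PySem.Dict.empty : PySem.Dict Int Bool).contains v)).length
      = (PySem.Set.ofList a).length := by simp
  rw [hA]
  -- B's value: number of distinct elements of sorted(a ++ b) = |set(a ++ b)|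
  show _ = ((PySem.List.sorted (a ++ b) (fun x => x) false).foldl doUnionAltStep ((0 : Int), (none : Option Int))).1
  rw [doUnion_scan_distinct _ (by simpa using PySem.List.sorted_pairwise (a ++ b) (fun x => x)),
    doUnion_ofList_length_perm _ (a ++ b) (PySem.List.sorted_perm (a ++ b) (fun x => x) false)]
  -- |set(a ++ b)| = |set(a)| + |new elements of b|
  rw [PySem.Set.ofList_append, PySem.Set.update_eq_append_filter, List.length_append]
  push_cast
  omega
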